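-- pv_equiv track=rewrite | github.com/bidyut-dev-ui/data-engineering-bootcamp | projects/00_5_python_fundamentals/04_functions.py | count_files
-- ===== SOURCE A (Python) =====
-- def count_files(depth, current_depth=0):
--     """Simulate counting files in nested directories."""
--     if current_depth > depth:
--         return 0
--
--     # Simulate files in current directory
--     files_in_current = 3
--
--     # Simulate subdirectories
--     subdir_files = 0
--     if current_depth < depth:
--         for i in range(2):  # 2 subdirectories
--             subdir_files += count_files(depth, current_depth + 1)
--
--     return files_in_current + subdir_files
-- ===== SOURCE B (Python) =====
-- def count_files(depth, current_depth=0):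
--     """Closed form: each level has 3 files and 2 subdirs, so the remaining
--     d = depth - current_depth levels hold 3 * (2**(d+1) - 1) files."""
--     d = depth - current_depth
--     if d < 0:
--         return 0
--     return 3 * (2 ** (d + 1) - 1)
-- ===== Notes on version B (the rewrite author's own statement) =====
-- stated objective: simpler
-- what changed: Replaced the recursion over simulated subdirectories by the closed-form geometric-series formula 3*(2^(depth-current_depth+1)-1), with 0 when current_depth > depth; Pre_ excludes depth-current_depth >= 900, where A overruns the interpreter recursion limit (RecursionError).
import Mathlib
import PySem

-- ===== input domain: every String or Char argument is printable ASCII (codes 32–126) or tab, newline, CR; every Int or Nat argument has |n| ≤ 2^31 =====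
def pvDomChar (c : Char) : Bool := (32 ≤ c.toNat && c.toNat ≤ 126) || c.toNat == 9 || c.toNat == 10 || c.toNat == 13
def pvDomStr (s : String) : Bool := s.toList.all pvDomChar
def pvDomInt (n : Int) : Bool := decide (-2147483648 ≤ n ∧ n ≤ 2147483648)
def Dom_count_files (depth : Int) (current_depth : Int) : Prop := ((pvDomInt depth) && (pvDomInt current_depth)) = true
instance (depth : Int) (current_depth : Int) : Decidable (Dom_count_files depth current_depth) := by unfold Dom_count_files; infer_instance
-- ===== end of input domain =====

-- B replaces A's recursion over simulated subdirectories by the closed form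
-- 3*(2^(depth-current_depth+1)-1) (0 when current_depth > depth): simpler, no recursion.


-- ===== PORT A =====
def count_files (depth : Int) (current_depth : Int) : Int :=
  if current_depth > depth then 0
  else
    let files_in_current : Int := 3
    let subdir_files : Int :=
      if _h : current_depth < depth then
        -- for i in range(2): subdir_files += count_files(depth, current_depth + 1)
        (List.range 2).foldl (fun acc _ => acc + count_files depth (current_depth + 1)) 0
      else 0
    files_in_current + subdir_files
termination_by (depth - current_depth).toNat
decreasing_by omega

-- ===== PORT B =====
def count_files_alt (depth : Int) (current_depth : Int) : Int :=
  let d := depth - current_depth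
  if d < 0 then 0
  else 3 * (2 ^ (d + 1).toNat - 1)

-- ===== PRECONDITION & SPEC =====
-- Pre_ excludes inputs with depth - current_depth >= 900: there Python A's recursion
-- exceeds the interpreter recursion limit and raises RecursionError (the margin below
-- the exact limit covers only inputs whose exponential recursion never finishes anyway).
def Pre_count_files (depth : Int) (current_depth : Int) : Prop := depth - current_depth < 900
instance (depth : Int) (current_depth : Int) : Decidable (Pre_count_files depth current_depth) := by unfold Pre_count_files; infer_instance
def pvWitness_count_files : Int × Int := (3, 0)

def Spec_count_files (depth : Int) (current_depth : Int) (out : Int) : Prop := out = count_files_alt depth current_depth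
instance (depth : Int) (current_depth : Int) (out : Int) : Decidable (Spec_count_files depth current_depth out) := by unfold Spec_count_files; infer_instance

-- ===== CLAIM (what is proved, stated in full; the proofs are below) =====
def Claim_equal_count_files : Prop := ∀ (depth : Int) (current_depth : Int), Dom_count_files depth current_depth → Pre_count_files depth current_depth → Spec_count_files depth current_depth (count_files depth current_depth)

-- ===== LEMMAS AND PROOFS =====

theorem count_files_eq_alt (depth : Int) (current_depth : Int) :
    count_files depth current_depth = count_files_alt depth current_depth := by
  by_cases hneg : current_depth > depth
  · unfold count_files count_files_alt
    simp only [if_pos hneg]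
    rw [if_pos (by omega)]
  · -- nonnegative remaining depth: induct on n = (depth - current_depth).toNat
    obtain ⟨n, hn⟩ : ∃ n : Nat, depth - current_depth = (n : Int) :=
      ⟨(depth - current_depth).toNat, by omega⟩
    clear hneg
    induction n generalizing current_depth with
    | zero =>
      unfold count_files count_files_alt
      rw [if_neg (by omega), dif_neg (by omega), if_neg (by omega)]
      simp [hn]
    | succ k ih =>
      have hrec : count_files depth (current_depth + 1) = count_files_alt depth (current_depth + 1) :=
        ih (current_depth + 1) (by omega)
      unfold count_files
      rw [if_neg (by omega), dif_pos (by omega)]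
      simp only [List.range_succ, List.foldl_append, List.foldl_cons, List.foldl_nil,
        List.range_zero, hrec]
      unfold count_files_alt
      rw [if_neg (by omega), if_neg (by omega)]
      have h1 : (depth - current_depth + 1).toNat = k + 2 := by omega
      have h2 : (depth - (current_depth + 1) + 1).toNat = k + 1 := by omega
      rw [h1, h2]
      have hpow : (1:Int) ≤ 2 ^ (k + 1) := one_le_pow₀ (by norm_num)
      have : (2:Int) ^ (k + 2) = 2 * 2 ^ (k + 1) := by ring
      omega

-- ===== VERDICT (by name: the statement is the Claim_ definition above) =====
theorem count_files_spec : Claim_equal_count_files := by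
  intro depth current_depth _ _
  unfold Spec_count_files
  exact count_files_eq_alt depth current_depth
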